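-- pv_equiv track=rewrite | github.com/DarraghOReilly211/CA117 | week-01/wordcomps_031.py | anagram_for_angle
-- ===== SOURCE A (Python) =====
-- def anagram_for_angle(word):
--     check = "angle"
--     if len(word) == len(check):
--         word = word.lower()
--         for char in check:
--             if char not in word or word == "angle":
--                 return False
--             word = word.replace(char, "*", 1)
--         return True
--     else:
--         return False
-- ===== SOURCE B (Python) =====
-- def anagram_for_angle(word):
--     w = word.lower()
--     return sorted(w) == sorted("angle") and w != "angle"
-- ===== Notes on version B (the rewrite author's own statement) =====
-- stated objective: simpler
-- what changed: Replaces A's incremental scan-and-remove loop (membership test plus replace-first-occurrence per letter) with a single sorted-multiset comparison guarded by a proper-anagram check (w != 'angle').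
import Mathlib
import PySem

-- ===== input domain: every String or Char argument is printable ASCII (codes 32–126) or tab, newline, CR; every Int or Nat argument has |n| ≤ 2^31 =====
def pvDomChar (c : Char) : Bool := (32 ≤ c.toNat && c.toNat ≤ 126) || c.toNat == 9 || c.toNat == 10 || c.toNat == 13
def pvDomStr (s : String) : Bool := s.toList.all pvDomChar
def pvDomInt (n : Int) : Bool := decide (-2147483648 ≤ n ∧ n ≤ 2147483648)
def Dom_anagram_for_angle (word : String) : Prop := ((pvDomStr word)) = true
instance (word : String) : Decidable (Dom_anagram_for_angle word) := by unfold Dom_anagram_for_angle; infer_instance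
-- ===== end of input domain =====

-- B replaces A's per-letter scan-and-remove loop with one sorted-multiset comparison plus a
-- proper-anagram guard (w != "angle"); objective: simpler.

-- ===== PORT A =====
-- the for-loop over the chars of "angle"; state = the current (partially starred-out) word.
-- word.replace(char, "*", 1) is List.replace (replace the FIRST occurrence): exact for a
-- single-char pattern with count 1.
def anagramLoopA : List Char → List Char → Bool
  | [], _ => true
  | c :: rest, w =>
      if c ∉ w ∨ w = "angle".toList then false
      else anagramLoopA rest (w.replace c '*')

def anagram_for_angle (word : String) : Bool :=
  let check := "angle"
  if PySem.Str.len word = PySem.Str.len check then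
    anagramLoopA check.toList (PySem.Chars.lower word.toList)
  else false

-- ===== PORT B =====
def anagram_for_angle_alt (word : String) : Bool :=
  let w := PySem.Str.lower word
  (PySem.List.sorted w.toList (fun x => x) == PySem.List.sorted "angle".toList (fun x => x))
    && (w != "angle")

-- ===== PRECONDITION & SPEC =====
def Spec_anagram_for_angle (word : String) (out : Bool) : Prop := out = anagram_for_angle_alt word
instance (word : String) (out : Bool) : Decidable (Spec_anagram_for_angle word out) := by unfold Spec_anagram_for_angle; infer_instance

-- ===== CLAIM (what is proved, stated in full; the proofs are below) =====
def Claim_equal_anagram_for_angle : Prop := ∀ (word : String), Dom_anagram_for_angle word → Spec_anagram_for_angle word (anagram_for_angle word)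

-- ===== LEMMAS AND PROOFS =====

theorem mem_replace_ne {c a b : Char} {l : List Char} (h1 : c ≠ a) (h2 : c ≠ b) :
    c ∈ l.replace a b ↔ c ∈ l := by
  induction l with
  | nil => simp [List.replace]
  | cons x xs ih =>
    rw [List.replace_cons]
    by_cases hx : a = x
    · simp only [hx, beq_self_eq_true]
      simp [← hx, h1, h2]
    · simp only [beq_eq_false_iff_ne.mpr hx]
      simp [ih]

theorem mem_replace_self {a b : Char} {l : List Char} (h : a ∈ l) : b ∈ l.replace a b := by
  induction l with
  | nil => simp at h
  | cons x xs ih =>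
    rw [List.replace_cons]
    by_cases hx : a = x
    · simp [hx]
    · simp only [beq_eq_false_iff_ne.mpr hx]
      rcases List.mem_cons.mp h with h' | h'
      · exact absurd h' hx
      · simp [ih h']

theorem star_ne_angle {v : List Char} (h : '*' ∈ v) : v ≠ "angle".toList := by
  intro hc; rw [hc] at h; revert h; decide

-- a successful loop run forces membership of every pattern letter in the initial word
theorem loopA_true_mem (cs : List Char) (w : List Char)
    (hnd : cs.Nodup) (hstar : '*' ∉ cs)
    (h : anagramLoopA cs w = true) : ∀ c ∈ cs, c ∈ w := by
  induction cs generalizing w with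
  | nil => intro c hc; simp at hc
  | cons c rest ih =>
    rw [anagramLoopA] at h
    split at h
    · simp at h
    next hc =>
      push Not at hc
      intro c' hc'
      rcases List.mem_cons.mp hc' with rfl | hmem
      · exact hc.1
      · have hne : c' ≠ c := fun he => (List.nodup_cons.mp hnd).1 (he ▸ hmem)
        have hns : c' ≠ '*' := fun he => hstar (he ▸ hc')
        exact (mem_replace_ne hne hns).mp
          (ih _ (List.nodup_cons.mp hnd).2 (fun hx => hstar (List.mem_cons_of_mem _ hx)) h c' hmem)

-- conversely, membership of every (distinct, non-'*') pattern letter runs the loop to true,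
-- provided the initial word is not the literal "angle"
theorem loopA_of_mem (cs : List Char) (w : List Char)
    (hnd : cs.Nodup) (hstar : '*' ∉ cs)
    (hmem : ∀ c ∈ cs, c ∈ w) (hok : w ≠ "angle".toList) :
    anagramLoopA cs w = true := by
  induction cs generalizing w with
  | nil => rfl
  | cons c rest ih =>
    have hcw : c ∈ w := hmem c List.mem_cons_self
    rw [anagramLoopA, if_neg (by push Not; exact ⟨hcw, hok⟩)]
    apply ih _ (List.nodup_cons.mp hnd).2 (fun hx => hstar (List.mem_cons_of_mem _ hx))
    · intro c' hc'
      have hne : c' ≠ c := fun he => (List.nodup_cons.mp hnd).1 (he ▸ hc')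
      have hns : c' ≠ '*' := fun he => hstar (he ▸ List.mem_cons_of_mem _ hc')
      exact (mem_replace_ne hne hns).mpr (hmem c' (List.mem_cons_of_mem _ hc'))
    · exact star_ne_angle (mem_replace_self hcw)

theorem perm_of_len_mem (w : List Char) (hlen : w.length = 5)
    (hmem : ∀ c ∈ "angle".toList, c ∈ w) : w.Perm "angle".toList := by
  have hsub : ("angle".toList).Subperm w := List.subperm_of_subset (by decide) hmem
  exact (hsub.perm_of_length_le (by rw [hlen]; decide)).symm

-- the loop characterised: on a 5-letter word it decides "proper anagram of angle"
theorem loopA_char (w : List Char) (hlen : w.length = 5) :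
    anagramLoopA "angle".toList w
      = (decide (w.Perm "angle".toList) && decide (w ≠ "angle".toList)) := by
  by_cases hp : w.Perm "angle".toList
  · by_cases hne : w = "angle".toList
    · rw [hne]; decide
    · rw [loopA_of_mem "angle".toList w (by decide) (by decide)
        (fun c hc => hp.mem_iff.mpr hc) hne,
        decide_eq_true hp, decide_eq_true (show w ≠ "angle".toList from hne)]
      rfl
  · have hfalse : anagramLoopA "angle".toList w = false := by
      apply Bool.eq_false_iff.mpr
      intro h
      exact hp (perm_of_len_mem w hlen (loopA_true_mem "angle".toList w (by decide) (by decide) h))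
    rw [hfalse, decide_eq_false hp]
    rfl

theorem chars_lower_length (l : List Char) : (PySem.Chars.lower l).length = l.length := by
  simp [PySem.Chars.lower]

-- B characterised the same way
theorem alt_char (word : String) :
    anagram_for_angle_alt word
      = (decide ((PySem.Chars.lower word.toList).Perm "angle".toList)
          && decide (PySem.Chars.lower word.toList ≠ "angle".toList)) := by
  have h1 : (PySem.List.sorted (PySem.Str.lower word).toList (fun x => x)
        == PySem.List.sorted "angle".toList (fun x => x))
      = decide ((PySem.Chars.lower word.toList).Perm "angle".toList) := by
    rw [PySem.Str.toList_lower]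
    by_cases hp : (PySem.Chars.lower word.toList).Perm "angle".toList
    · rw [(PySem.List.sorted_id_eq_sorted_id_iff_perm _ _).mpr hp, decide_eq_true hp]
      exact beq_self_eq_true _
    · rw [decide_eq_false hp]
      exact beq_eq_false_iff_ne.mpr
        (fun hc => hp ((PySem.List.sorted_id_eq_sorted_id_iff_perm _ _).mp hc))
  have h2 : (PySem.Str.lower word != "angle")
      = decide (PySem.Chars.lower word.toList ≠ "angle".toList) := by
    by_cases he : PySem.Str.lower word = "angle"
    · have hl : PySem.Chars.lower word.toList = "angle".toList := by
        rw [← PySem.Str.toList_lower, he]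
      rw [decide_eq_false (show ¬ PySem.Chars.lower word.toList ≠ "angle".toList
        from fun hc => hc hl), he]
      decide
    · have hne' : PySem.Chars.lower word.toList ≠ "angle".toList := by
        intro hc
        exact he (String.ext (by rw [PySem.Str.toList_lower]; exact hc))
      rw [decide_eq_true hne']
      exact bne_iff_ne.mpr he
  show (((PySem.List.sorted (PySem.Str.lower word).toList fun x => x)
      == PySem.List.sorted "angle".toList fun x => x) && (PySem.Str.lower word != "angle")) = _
  rw [h1, h2]

-- ===== VERDICT (by name: the statement is the Claim_ definition above) =====
theorem anagram_for_angle_spec : Claim_equal_anagram_for_angle := by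
  intro word _
  unfold Spec_anagram_for_angle
  rw [alt_char]
  unfold anagram_for_angle
  simp only [PySem.Str.len_eq]
  by_cases hlen : ((word.toList.length : Int) = ("angle".toList.length : Int))
  · rw [if_pos hlen]
    have h5 : (PySem.Chars.lower word.toList).length = 5 := by
      rw [chars_lower_length]
      have h : word.toList.length = "angle".toList.length := by exact_mod_cast hlen
      rw [h]; decide
    exact loopA_char _ h5
  · rw [if_neg hlen]
    have hnp : ¬ (PySem.Chars.lower word.toList).Perm "angle".toList := by
      intro hc
      apply hlen
      have h := hc.length_eq
      rw [chars_lower_length] at h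
      exact_mod_cast h
    rw [decide_eq_false hnp]
    rfl
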